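-- pv_equiv track=rewrite | github.com/RandomSearch18/aoc-2024 | 1/main.py | calculate_similarity_scores
-- ===== SOURCE A (Python) =====
-- def calculate_similarity_scores(input_rows: list[tuple[int, int]]) -> int:
--     total_similarity_score = 0
--     left_numbers = [row[0] for row in input_rows]
--     right_numbers = [row[1] for row in input_rows]
--
--     for left_number in left_numbers:
--         occurrences = right_numbers.count(left_number)
--         similarity_score = left_number * occurrences
--         total_similarity_score += similarity_score
--
--     return total_similarity_score
-- ===== SOURCE B (Python) =====
-- def calculate_similarity_scores(input_rows: list[tuple[int, int]]) -> int:
--     left = sorted(row[0] for row in input_rows)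
--     right = sorted(row[1] for row in input_rows)
--     total = 0
--     j = 0
--     m = len(right)
--     for a in left:
--         while j < m and right[j] < a:
--             j += 1
--         k = j
--         while k < m and right[k] == a:
--             k += 1
--         total += a * (k - j)
--     return total
-- ===== Notes on version B (the rewrite author's own statement) =====
-- stated objective: alternative
-- what changed: Replaced A's per-left-element scan of the right column with sorting both columns once and a two-pointer merge that advances a right pointer past smaller values and counts each value's run length.
import Mathlib
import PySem

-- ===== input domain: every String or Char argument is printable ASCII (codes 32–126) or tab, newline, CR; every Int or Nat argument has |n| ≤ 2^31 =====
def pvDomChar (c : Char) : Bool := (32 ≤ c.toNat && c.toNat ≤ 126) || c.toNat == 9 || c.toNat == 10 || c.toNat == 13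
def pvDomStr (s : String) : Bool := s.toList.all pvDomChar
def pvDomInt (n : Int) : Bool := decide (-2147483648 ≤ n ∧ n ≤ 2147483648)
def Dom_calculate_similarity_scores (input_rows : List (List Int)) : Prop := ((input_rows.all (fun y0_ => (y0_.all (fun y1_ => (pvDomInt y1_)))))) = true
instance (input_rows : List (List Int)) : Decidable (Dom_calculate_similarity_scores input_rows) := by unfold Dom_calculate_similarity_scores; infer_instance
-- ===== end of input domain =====

-- B sorts both columns and merges them with a two-pointer run count instead of A's
-- per-left-element scan of the right column (objective: alternative algorithm).


-- ===== PORT A =====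
-- row[0] / row[1]: in range under Pre_ (every row has length ≥ 2), so the
-- pyGet? result is some and the .getD 0 default is never used inside Pre_.
def calculate_similarity_scores (input_rows : List (List Int)) : Int :=
  let left_numbers := input_rows.map (fun row => (PySem.List.pyGet? row 0).getD 0)
  let right_numbers := input_rows.map (fun row => (PySem.List.pyGet? row 1).getD 0)
  left_numbers.foldl
    (fun total_similarity_score left_number =>
      let occurrences : Int := right_numbers.count left_number
      let similarity_score := left_number * occurrences
      total_similarity_score + similarity_score) 0

-- ===== PORT B =====
-- Two-pointer merge; the right pointer j is represented by the remaining right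
-- suffix st.1 (the inner 'while right[j] < a: j += 1' is the dropWhile, the run
-- count 'while right[k] == a: k += 1' is the takeWhile length).
def calculate_similarity_scores_alt (input_rows : List (List Int)) : Int :=
  let left := PySem.List.sorted (input_rows.map (fun row => (PySem.List.pyGet? row 0).getD 0)) (fun x => x) false
  let right := PySem.List.sorted (input_rows.map (fun row => (PySem.List.pyGet? row 1).getD 0)) (fun x => x) false
  (left.foldl
    (fun st a =>
      let r := st.1.dropWhile (fun b => decide (b < a))
      let run := (r.takeWhile (fun b => b == a)).length
      (r, st.2 + a * (run : Int))) (right, (0 : Int))).2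

-- ===== PRECONDITION & SPEC =====
-- Pre_: every row has at least two elements; on shorter rows both Pythons raise IndexError.
def Pre_calculate_similarity_scores (input_rows : List (List Int)) : Prop :=
  ∀ row ∈ input_rows, 2 ≤ row.length
instance (input_rows : List (List Int)) : Decidable (Pre_calculate_similarity_scores input_rows) := by
  unfold Pre_calculate_similarity_scores; infer_instance
def pvWitness_calculate_similarity_scores : List (List Int) := [[3, 4], [4, 3], [3, 3]]
def Spec_calculate_similarity_scores (input_rows : List (List Int)) (out : Int) : Prop := out = calculate_similarity_scores_alt input_rows
instance (input_rows : List (List Int)) (out : Int) : Decidable (Spec_calculate_similarity_scores input_rows out) := by unfold Spec_calculate_similarity_scores; infer_instance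

-- ===== CLAIM (what is proved, stated in full; the proofs are below) =====
def Claim_equal_calculate_similarity_scores : Prop := ∀ (input_rows : List (List Int)), Dom_calculate_similarity_scores input_rows → Pre_calculate_similarity_scores input_rows → Spec_calculate_similarity_scores input_rows (calculate_similarity_scores input_rows)

-- ===== LEMMAS AND PROOFS =====

-- Counting x is unaffected by dropping a prefix of elements < a ≤ x.
theorem count_dropWhile_lt (r : List Int) (a x : Int) (hax : a ≤ x) :
    (r.dropWhile (fun b => decide (b < a))).count x = r.count x := by
  conv_rhs => rw [← List.takeWhile_append_dropWhile (p := fun b => decide (b < a)) (l := r)]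
  rw [List.count_append]
  have : (r.takeWhile (fun b => decide (b < a))).count x = 0 := by
    rw [List.count_eq_zero]
    intro hx
    have := List.mem_takeWhile_imp hx
    simp at this
    omega
  omega

-- In a sorted list all of whose elements are ≥ a, the leading run of a's is all of them.
theorem takeWhile_run_count (a : Int) (r : List Int)
    (hr : r.Pairwise (· ≤ ·)) (hb : ∀ y ∈ r, a ≤ y) :
    (r.takeWhile (fun b => b == a)).length = r.count a := by
  induction r with
  | nil => rfl
  | cons b r' ih =>
    rcases List.pairwise_cons.mp hr with ⟨hbr, hr'⟩
    by_cases hba : b = a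
    · subst hba
      simp only [List.takeWhile, BEq.rfl, List.count_cons_self]
      simp only [List.length_cons]
      rw [ih hr' (fun y hy => hbr y hy)]
    · have hab : a < b := lt_of_le_of_ne (hb b (List.mem_cons_self)) (fun h => hba h.symm)
      have h0 : (b :: r').count a = 0 := by
        rw [List.count_eq_zero]
        intro hy
        rcases List.mem_cons.mp hy with h | h
        · omega
        · have := hbr a h; omega
      rw [h0]
      have : (b == a) = false := by simp [hba]
      simp [List.takeWhile, this]

-- dropWhile (< a) then the run of a's = total count of a, on a sorted list.
theorem run_count (a : Int) (r : List Int) (hr : r.Pairwise (· ≤ ·)) :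
    ((r.dropWhile (fun b => decide (b < a))).takeWhile (fun b => b == a)).length = r.count a := by
  induction r with
  | nil => rfl
  | cons b r' ih =>
    rcases List.pairwise_cons.mp hr with ⟨hbr, hr'⟩
    by_cases hba : b < a
    · have : (decide (b < a)) = true := by simp [hba]
      simp only [List.dropWhile, this]
      rw [ih hr', List.count_cons]
      have : ¬ (b = a) := by omega
      simp [this]
    · have : (decide (b < a)) = false := by simp [hba]
      simp only [List.dropWhile, this]
      apply takeWhile_run_count a (b :: r') hr
      intro y hy
      rcases List.mem_cons.mp hy with h | h
      · omega
      · have := hbr y h; omega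

-- Invariant of B's merge fold, for sorted left l and sorted right r.
theorem merge_fold (l : List Int) (r : List Int) (t : Int)
    (hl : l.Pairwise (· ≤ ·)) (hr : r.Pairwise (· ≤ ·)) :
    (l.foldl (fun st a =>
        let r' := st.1.dropWhile (fun b => decide (b < a))
        let run := (r'.takeWhile (fun b => b == a)).length
        (r', st.2 + a * (run : Int))) (r, t)).2
      = t + (l.map (fun a => a * ((r.count a : Int)))).sum := by
  induction l generalizing r t with
  | nil => simp
  | cons a l' ih =>
    rcases List.pairwise_cons.mp hl with ⟨hal, hl'⟩
    simp only [List.foldl_cons, List.map_cons, List.sum_cons]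
    have hr1 : (r.dropWhile (fun b => decide (b < a))).Pairwise (· ≤ ·) :=
      hr.sublist (List.dropWhile_sublist _)
    rw [ih (r.dropWhile (fun b => decide (b < a))) _ hl' hr1]
    rw [run_count a r hr]
    have hmap : l'.map (fun x => x * (((r.dropWhile (fun b => decide (b < a))).count x : Int)))
        = l'.map (fun x => x * ((r.count x : Int))) := by
      apply List.map_congr_left
      intro x hx
      rw [count_dropWhile_lt r a x (hal x hx)]
    rw [hmap]
    ring

theorem calc_sim_eq (input_rows : List (List Int)) :
    calculate_similarity_scores input_rows = calculate_similarity_scores_alt input_rows := by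
  unfold calculate_similarity_scores calculate_similarity_scores_alt
  set leftU := input_rows.map (fun row => (PySem.List.pyGet? row 0).getD 0) with hleftU
  set rightU := input_rows.map (fun row => (PySem.List.pyGet? row 1).getD 0) with hrightU
  set leftS := PySem.List.sorted leftU (fun x => x) false with hleftS
  set rightS := PySem.List.sorted rightU (fun x => x) false with hrightS
  have hlperm : leftS.Perm leftU := PySem.List.sorted_perm _ _ _
  have hrperm : rightS.Perm rightU := PySem.List.sorted_perm _ _ _
  have hlp : leftS.Pairwise (· ≤ ·) := by
    have := PySem.List.sorted_pairwise (xs := leftU) (key := fun x => x)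
    simpa using this
  have hrp : rightS.Pairwise (· ≤ ·) := by
    have := PySem.List.sorted_pairwise (xs := rightU) (key := fun x => x)
    simpa using this
  rw [merge_fold leftS rightS 0 hlp hrp]
  rw [PySem.List.foldl_add (g := fun a => a * ((rightU.count a : Int)))]
  have hcount : leftS.map (fun a => a * ((rightS.count a : Int)))
      = leftS.map (fun a => a * ((rightU.count a : Int))) := by
    apply List.map_congr_left
    intro x _
    rw [hrperm.count_eq]
  rw [hcount]
  have : (leftS.map (fun a => a * ((rightU.count a : Int)))).sum
      = (leftU.map (fun a => a * ((rightU.count a : Int)))).sum := by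
    exact (hlperm.map _).sum_eq
  omega

-- ===== VERDICT (by name: the statement is the Claim_ definition above) =====
theorem calculate_similarity_scores_spec : Claim_equal_calculate_similarity_scores := by
  intro input_rows _ _
  exact calc_sim_eq input_rows
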